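-- pv_equiv track=rewrite | github.com/harris-boyce/movie-recs | python-ml/src/feature_utils.py | get_feature_categories
-- ===== SOURCE A (Python) =====
-- from typing import Any, Dict, List, Optional, Tuple, Union
--
-- def get_feature_categories(feature_names: List[str]) -> Dict[str, List[str]]:
--     """Group features by category."""
--     categories = {
--         'text': [],
--         'genre': [],
--         'temporal': [],
--         'runtime': [],
--         'rating': [],
--         'cast_crew': [],
--         'other': []
--     }
--
--     for name in feature_names:
--         if name.startswith('text_'):
--             categories['text'].append(name)
--         elif name.startswith('genre_'):
--             categories['genre'].append(name)
--         elif name.startswith('decade_'):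
--             categories['temporal'].append(name)
--         elif name.startswith('runtime_'):
--             categories['runtime'].append(name)
--         elif name.startswith('rating_'):
--             categories['rating'].append(name)
--         elif name.startswith(('cast_', 'crew_')):
--             categories['cast_crew'].append(name)
--         else:
--             categories['other'].append(name)
--
--     # Remove empty categories
--     return {k: v for k, v in categories.items() if v}
-- ===== SOURCE B (Python) =====
-- from typing import Any, Dict, List, Optional, Tuple, Union
--
-- _CATEGORY_PREFIXES = [
--     ('text', ('text_',)),
--     ('genre', ('genre_',)),
--     ('temporal', ('decade_',)),
--     ('runtime', ('runtime_',)),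
--     ('rating', ('rating_',)),
--     ('cast_crew', ('cast_', 'crew_')),
-- ]
--
-- def get_feature_categories(feature_names: List[str]) -> Dict[str, List[str]]:
--     """Group features by category."""
--     grouped = [(cat, [n for n in feature_names if n.startswith(prefixes)])
--                for cat, prefixes in _CATEGORY_PREFIXES]
--     all_prefixes = tuple(p for _, ps in _CATEGORY_PREFIXES for p in ps)
--     other = [n for n in feature_names if not n.startswith(all_prefixes)]
--     grouped.append(('other', other))
--     return {k: v for k, v in grouped if v}
-- ===== Notes on version B (the rewrite author's own statement) =====
-- stated objective: simpler
-- what changed: Replaces the single pass with a 7-way if/elif chain mutating seven dict entries by a declarative prefix table and per-category filters (one filter per category, 'other' as the complement of all prefixes), assembled in canonical order.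
import Mathlib
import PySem

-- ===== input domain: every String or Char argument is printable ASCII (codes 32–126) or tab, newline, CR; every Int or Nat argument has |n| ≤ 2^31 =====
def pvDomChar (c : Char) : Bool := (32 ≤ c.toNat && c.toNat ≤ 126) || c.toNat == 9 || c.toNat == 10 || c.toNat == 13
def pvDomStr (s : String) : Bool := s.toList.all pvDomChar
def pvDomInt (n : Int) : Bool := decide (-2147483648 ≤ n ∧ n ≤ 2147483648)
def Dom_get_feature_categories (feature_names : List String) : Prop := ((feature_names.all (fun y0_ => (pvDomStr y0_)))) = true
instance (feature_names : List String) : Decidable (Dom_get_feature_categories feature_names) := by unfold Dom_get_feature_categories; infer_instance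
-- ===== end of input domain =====

-- B groups by a prefix table with one filter per category instead of A's single pass with a 7-way if/elif chain; return value only, objective: simpler.

-- ===== PORT A =====
-- A's dict has seven fixed keys created up front; its state is ported as a 7-tuple of the
-- seven lists, updated by the same if/elif chain; the final dict comprehension keeps the
-- insertion-order items whose list is non-empty.
def get_feature_categories (feature_names : List String) : List (String × List String) :=
  let cats := feature_names.foldl
    (fun (c : List String × List String × List String × List String × List String × List String × List String) name =>
      let (t, g, te, ru, ra, cc, o) := c
      if PySem.Str.startswith name "text_" then (t ++ [name], g, te, ru, ra, cc, o)
      else if PySem.Str.startswith name "genre_" then (t, g ++ [name], te, ru, ra, cc, o)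
      else if PySem.Str.startswith name "decade_" then (t, g, te ++ [name], ru, ra, cc, o)
      else if PySem.Str.startswith name "runtime_" then (t, g, te, ru ++ [name], ra, cc, o)
      else if PySem.Str.startswith name "rating_" then (t, g, te, ru, ra ++ [name], cc, o)
      else if PySem.Str.startswith name "cast_" || PySem.Str.startswith name "crew_" then
        (t, g, te, ru, ra, cc ++ [name], o)
      else (t, g, te, ru, ra, cc, o ++ [name]))
    ([], [], [], [], [], [], [])
  let (t, g, te, ru, ra, cc, o) := cats
  ([("text", t), ("genre", g), ("temporal", te), ("runtime", ru), ("rating", ra),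
    ("cast_crew", cc), ("other", o)]).filter (fun kv => !kv.2.isEmpty)

-- ===== PORT B =====
def pvCategoryPrefixes : List (String × List String) :=
  [("text", ["text_"]), ("genre", ["genre_"]), ("temporal", ["decade_"]),
   ("runtime", ["runtime_"]), ("rating", ["rating_"]), ("cast_crew", ["cast_", "crew_"])]

def get_feature_categories_alt (feature_names : List String) : List (String × List String) :=
  let grouped := pvCategoryPrefixes.map
    (fun cp => (cp.1, feature_names.filter (fun n => cp.2.any (fun p => PySem.Str.startswith n p))))
  let allPrefixes := pvCategoryPrefixes.flatMap (fun cp => cp.2)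
  let other := feature_names.filter (fun n => !allPrefixes.any (fun p => PySem.Str.startswith n p))
  (grouped ++ [("other", other)]).filter (fun kv => !kv.2.isEmpty)

-- ===== PRECONDITION & SPEC =====
def Spec_get_feature_categories (feature_names : List String) (out : List (String × List String)) : Prop := out = get_feature_categories_alt feature_names
instance (feature_names : List String) (out : List (String × List String)) : Decidable (Spec_get_feature_categories feature_names out) := by unfold Spec_get_feature_categories; infer_instance

-- ===== CLAIM (what is proved, stated in full; the proofs are below) =====
def Claim_equal_get_feature_categories : Prop := ∀ (feature_names : List String), Dom_get_feature_categories feature_names → Spec_get_feature_categories feature_names (get_feature_categories feature_names)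

-- ===== LEMMAS AND PROOFS =====

-- Two strings neither of which is a prefix of the other cannot both be prefixes of s.
theorem sw_excl (s a b : String) (hab : ¬ (a.toList <+: b.toList)) (hba : ¬ (b.toList <+: a.toList))
    (h : PySem.Str.startswith s a = true) : PySem.Str.startswith s b = false := by
  rw [PySem.Str.startswith_eq] at h ⊢
  rw [PySem.Chars.startswith_iff] at h
  by_contra hb
  rw [Bool.not_eq_false, PySem.Chars.startswith_iff] at hb
  rcases List.prefix_or_prefix_of_prefix h hb with h' | h'
  · exact hab h'
  · exact hba h'

theorem get_feature_categories_loop (fns : List String)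
    (t g te ru ra cc o : List String) :
    fns.foldl
      (fun (c : List String × List String × List String × List String × List String × List String × List String) name =>
        let (t, g, te, ru, ra, cc, o) := c
        if PySem.Str.startswith name "text_" then (t ++ [name], g, te, ru, ra, cc, o)
        else if PySem.Str.startswith name "genre_" then (t, g ++ [name], te, ru, ra, cc, o)
        else if PySem.Str.startswith name "decade_" then (t, g, te ++ [name], ru, ra, cc, o)
        else if PySem.Str.startswith name "runtime_" then (t, g, te, ru ++ [name], ra, cc, o)
        else if PySem.Str.startswith name "rating_" then (t, g, te, ru, ra ++ [name], cc, o)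
        else if PySem.Str.startswith name "cast_" || PySem.Str.startswith name "crew_" then
          (t, g, te, ru, ra, cc ++ [name], o)
        else (t, g, te, ru, ra, cc, o ++ [name])) (t, g, te, ru, ra, cc, o)
    = (t ++ fns.filter (fun n => PySem.Str.startswith n "text_"),
       g ++ fns.filter (fun n => PySem.Str.startswith n "genre_"),
       te ++ fns.filter (fun n => PySem.Str.startswith n "decade_"),
       ru ++ fns.filter (fun n => PySem.Str.startswith n "runtime_"),
       ra ++ fns.filter (fun n => PySem.Str.startswith n "rating_"),
       cc ++ fns.filter (fun n => PySem.Str.startswith n "cast_" || PySem.Str.startswith n "crew_"),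
       o ++ fns.filter (fun n =>
         !(PySem.Str.startswith n "text_" || PySem.Str.startswith n "genre_" ||
           PySem.Str.startswith n "decade_" || PySem.Str.startswith n "runtime_" ||
           PySem.Str.startswith n "rating_" || PySem.Str.startswith n "cast_" ||
           PySem.Str.startswith n "crew_"))) := by
  induction fns generalizing t g te ru ra cc o with
  | nil => simp
  | cons n rest ih =>
    simp only [List.foldl_cons, List.filter_cons]
    by_cases h1 : PySem.Str.startswith n "text_"
    · have e2 := sw_excl n "text_" "genre_" (by decide) (by decide) h1
      have e3 := sw_excl n "text_" "decade_" (by decide) (by decide) h1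
      have e4 := sw_excl n "text_" "runtime_" (by decide) (by decide) h1
      have e5 := sw_excl n "text_" "rating_" (by decide) (by decide) h1
      have e6 := sw_excl n "text_" "cast_" (by decide) (by decide) h1
      have e7 := sw_excl n "text_" "crew_" (by decide) (by decide) h1
      simp only [h1, e2, e3, e4, e5, e6, e7, List.foldl_cons, List.filter_cons, Bool.true_or, Bool.or_true, Bool.false_or, Bool.or_false, Bool.not_true, Bool.not_false, Bool.true_and, Bool.and_true, Bool.false_and, Bool.and_false, reduceIte]
      rw [ih]
      simp
    · by_cases h2 : PySem.Str.startswith n "genre_"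
      · have e3 := sw_excl n "genre_" "decade_" (by decide) (by decide) h2
        have e4 := sw_excl n "genre_" "runtime_" (by decide) (by decide) h2
        have e5 := sw_excl n "genre_" "rating_" (by decide) (by decide) h2
        have e6 := sw_excl n "genre_" "cast_" (by decide) (by decide) h2
        have e7 := sw_excl n "genre_" "crew_" (by decide) (by decide) h2
        simp only [h1, h2, e3, e4, e5, e6, e7, List.foldl_cons, List.filter_cons, Bool.true_or, Bool.or_true, Bool.false_or, Bool.or_false, Bool.not_true, Bool.not_false, Bool.true_and, Bool.and_true, Bool.false_and, Bool.and_false, reduceIte]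
        rw [ih]
        simp
      · by_cases h3 : PySem.Str.startswith n "decade_"
        · have e4 := sw_excl n "decade_" "runtime_" (by decide) (by decide) h3
          have e5 := sw_excl n "decade_" "rating_" (by decide) (by decide) h3
          have e6 := sw_excl n "decade_" "cast_" (by decide) (by decide) h3
          have e7 := sw_excl n "decade_" "crew_" (by decide) (by decide) h3
          simp only [h1, h2, h3, e4, e5, e6, e7, List.foldl_cons, List.filter_cons, Bool.true_or, Bool.or_true, Bool.false_or, Bool.or_false, Bool.not_true, Bool.not_false, Bool.true_and, Bool.and_true, Bool.false_and, Bool.and_false, reduceIte]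
          rw [ih]
          simp
        · by_cases h4 : PySem.Str.startswith n "runtime_"
          · have e5 := sw_excl n "runtime_" "rating_" (by decide) (by decide) h4
            have e6 := sw_excl n "runtime_" "cast_" (by decide) (by decide) h4
            have e7 := sw_excl n "runtime_" "crew_" (by decide) (by decide) h4
            simp only [h1, h2, h3, h4, e5, e6, e7, List.foldl_cons, List.filter_cons, Bool.true_or, Bool.or_true, Bool.false_or, Bool.or_false, Bool.not_true, Bool.not_false, Bool.true_and, Bool.and_true, Bool.false_and, Bool.and_false, reduceIte]
            rw [ih]
            simp
          · by_cases h5 : PySem.Str.startswith n "rating_"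
            · have e6 := sw_excl n "rating_" "cast_" (by decide) (by decide) h5
              have e7 := sw_excl n "rating_" "crew_" (by decide) (by decide) h5
              simp only [h1, h2, h3, h4, h5, e6, e7, List.foldl_cons, List.filter_cons, Bool.true_or, Bool.or_true, Bool.false_or, Bool.or_false, Bool.not_true, Bool.not_false, Bool.true_and, Bool.and_true, Bool.false_and, Bool.and_false, reduceIte]
              rw [ih]
              simp
            · by_cases h6 : PySem.Str.startswith n "cast_" || PySem.Str.startswith n "crew_"
              · rcases Bool.or_eq_true_iff.mp h6 with hc | hc
                · have e7 := sw_excl n "cast_" "crew_" (by decide) (by decide) hc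
                  simp only [h1, h2, h3, h4, h5, hc, e7, List.foldl_cons, List.filter_cons, Bool.true_or, Bool.or_true, Bool.false_or, Bool.or_false, Bool.not_true, Bool.not_false, Bool.true_and, Bool.and_true, Bool.false_and, Bool.and_false, reduceIte]
                  rw [ih]
                  simp
                · have e6 := sw_excl n "crew_" "cast_" (by decide) (by decide) hc
                  simp only [h1, h2, h3, h4, h5, hc, e6, List.foldl_cons, List.filter_cons, Bool.true_or, Bool.or_true, Bool.false_or, Bool.or_false, Bool.not_true, Bool.not_false, Bool.true_and, Bool.and_true, Bool.false_and, Bool.and_false, reduceIte]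
                  rw [ih]
                  simp
              · simp only [Bool.or_eq_true_iff, not_or, Bool.not_eq_true] at h6
                simp only [h1, h2, h3, h4, h5, h6.1, h6.2, List.foldl_cons, List.filter_cons, Bool.true_or, Bool.or_true, Bool.false_or, Bool.or_false, Bool.not_true, Bool.not_false, Bool.true_and, Bool.and_true, Bool.false_and, Bool.and_false, reduceIte]
                rw [ih]
                simp

-- ===== VERDICT (by name: the statement is the Claim_ definition above) =====
theorem get_feature_categories_spec : Claim_equal_get_feature_categories := by
  intro fns _
  unfold Spec_get_feature_categories get_feature_categories get_feature_categories_alt pvCategoryPrefixes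
  rw [get_feature_categories_loop]
  simp [Bool.and_assoc]
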